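-- pv_equiv track=rewrite | github.com/mbtylla/irankiaivisiems | download_stocks.py | build_delta
-- ===== SOURCE A (Python) =====
-- def build_delta(previous_snapshot, current_snapshot):
--     """
--     Grąžina tik pasikeitimus.
--     Taip pat jei modelis buvo anksčiau, o dabar dingo,
--     į delta dedam su kiekiu 0.
--     """
--     delta = {}
--
--     all_models = set(previous_snapshot.keys()) | set(current_snapshot.keys())
--
--     for model in sorted(all_models):
--         old_qty = int(previous_snapshot.get(model, 0))
--         new_qty = int(current_snapshot.get(model, 0))
--
--         if old_qty != new_qty:
--             delta[model] = new_qty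
--
--     return delta
-- ===== SOURCE B (Python) =====
-- def build_delta(previous_snapshot, current_snapshot):
--     delta = {}
--     for model, new_qty in current_snapshot.items():
--         if int(previous_snapshot.get(model, 0)) != int(new_qty):
--             delta[model] = int(new_qty)
--     for model, old_qty in previous_snapshot.items():
--         if model not in current_snapshot and int(old_qty) != 0:
--             delta[model] = 0
--     return dict(sorted(delta.items(), key=lambda kv: kv[0]))
-- ===== Notes on version B (the rewrite author's own statement) =====
-- stated objective: alternative
-- what changed: Instead of sorting the union of all keys and probing both dicts for every model, B makes two differently-conditioned passes over the two dicts' own items (changed current entries, then disappeared nonzero previous entries) and sorts only the collected changes by key at the end.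
import Mathlib
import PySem

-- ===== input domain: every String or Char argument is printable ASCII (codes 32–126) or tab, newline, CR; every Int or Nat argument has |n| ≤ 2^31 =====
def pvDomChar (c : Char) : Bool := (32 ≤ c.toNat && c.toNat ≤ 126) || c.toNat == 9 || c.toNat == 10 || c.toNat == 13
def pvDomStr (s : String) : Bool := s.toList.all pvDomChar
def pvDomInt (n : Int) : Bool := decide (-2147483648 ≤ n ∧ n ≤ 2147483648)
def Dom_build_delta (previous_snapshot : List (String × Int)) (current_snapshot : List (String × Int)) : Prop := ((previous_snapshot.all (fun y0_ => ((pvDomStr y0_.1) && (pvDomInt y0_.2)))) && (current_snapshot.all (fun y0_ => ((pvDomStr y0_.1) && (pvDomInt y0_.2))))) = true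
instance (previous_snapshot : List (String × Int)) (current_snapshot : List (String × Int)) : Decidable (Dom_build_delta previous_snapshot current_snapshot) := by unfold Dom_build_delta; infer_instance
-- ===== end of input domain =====

-- B replaces A's single pass over the sorted union of all keys by two differently-conditioned
-- passes over the two dicts' own items, sorting only the collected changes at the end (alternative
-- decomposition, same cost).

-- ===== PORT A =====
def build_delta (previous_snapshot : List (String × Int)) (current_snapshot : List (String × Int)) : List (String × Int) :=
  let prev := PySem.Dict.ofList previous_snapshot
  let cur := PySem.Dict.ofList current_snapshot
  let all_models : PySem.Set String :=
    PySem.Set.union (PySem.Set.ofList prev.keys) (PySem.Set.ofList cur.keys)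
  let delta := (PySem.List.sorted all_models (fun x => x) false).foldl
    (fun (d : PySem.Dict String Int) model =>
      let old_qty := prev.getD model 0
      let new_qty := cur.getD model 0
      if old_qty ≠ new_qty then d.insert model new_qty else d)
    PySem.Dict.empty
  delta.items

-- ===== PORT B =====
def build_delta_alt (previous_snapshot : List (String × Int)) (current_snapshot : List (String × Int)) : List (String × Int) :=
  let prev := PySem.Dict.ofList previous_snapshot
  let cur := PySem.Dict.ofList current_snapshot
  let d1 := cur.items.foldl
    (fun (d : PySem.Dict String Int) kv =>
      if prev.getD kv.1 0 ≠ kv.2 then d.insert kv.1 kv.2 else d)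
    PySem.Dict.empty
  let d2 := prev.items.foldl
    (fun (d : PySem.Dict String Int) kv =>
      if cur.contains kv.1 = false ∧ kv.2 ≠ 0 then d.insert kv.1 0 else d)
    d1
  (PySem.Dict.ofList (PySem.List.sorted d2.items (fun kv => kv.1) false)).items

-- ===== PRECONDITION & SPEC =====
def Spec_build_delta (previous_snapshot : List (String × Int)) (current_snapshot : List (String × Int)) (out : List (String × Int)) : Prop := out = build_delta_alt previous_snapshot current_snapshot
instance (previous_snapshot : List (String × Int)) (current_snapshot : List (String × Int)) (out : List (String × Int)) : Decidable (Spec_build_delta previous_snapshot current_snapshot out) := by unfold Spec_build_delta; infer_instance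

-- ===== CLAIM (what is proved, stated in full; the proofs are below) =====
def Claim_equal_build_delta : Prop := ∀ (previous_snapshot : List (String × Int)) (current_snapshot : List (String × Int)), Dom_build_delta previous_snapshot current_snapshot → Spec_build_delta previous_snapshot current_snapshot (build_delta previous_snapshot current_snapshot)

-- ===== LEMMAS AND PROOFS =====

-- The comparison function both programs apply to a model name.
def pvF (P C : PySem.Dict String Int) (m : String) : Option (String × Int) :=
  if P.getD m 0 ≠ C.getD m 0 then some (m, C.getD m 0) else none

-- A fold of conditional fresh-key inserts appends exactly the conditional pairs.
theorem fold_cond_items {β : Type} (cond : β → Prop) [DecidablePred cond]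
    (key : β → String) (val : β → Int) (ms : List β) (d : PySem.Dict String Int)
    (hfresh : ∀ a ∈ ms, cond a → d.contains (key a) = false)
    (hnd : ((ms.filter (fun a => decide (cond a))).map key).Nodup) :
    (ms.foldl (fun d a => if cond a then d.insert (key a) (val a) else d) d).items
      = d.items ++ ms.filterMap (fun a => if cond a then some (key a, val a) else none) := by
  induction ms generalizing d with
  | nil => simp
  | cons a ms ih =>
    by_cases h : cond a
    · have hfa : d.contains (key a) = false := hfresh a (List.mem_cons_self) h
      have hfilter : (a :: ms).filter (fun a => decide (cond a))
          = a :: ms.filter (fun a => decide (cond a)) := by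
        simp [h]
      rw [hfilter] at hnd
      simp only [List.map_cons, List.nodup_cons] at hnd
      have step : (List.foldl (fun d a => if cond a then d.insert (key a) (val a) else d) d (a :: ms))
          = List.foldl (fun d a => if cond a then d.insert (key a) (val a) else d)
              (d.insert (key a) (val a)) ms := by
        simp [h]
      rw [step, ih (d.insert (key a) (val a))
            (by
              intro b hb hcb
              rw [PySem.Dict.contains_insert]
              have hkb : key b ∈ (ms.filter (fun a => decide (cond a))).map key := by
                exact List.mem_map_of_mem (List.mem_filter.mpr ⟨hb, by simpa using hcb⟩)
              have : key b ≠ key a := fun he => hnd.1 (he ▸ hkb)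
              simp [this, hfresh b (List.mem_cons_of_mem _ hb) hcb])
            hnd.2,
          PySem.Dict.items_insert_of_not_contains d (val a) hfa]
      simp [h]
    · have hfilter : (a :: ms).filter (fun a => decide (cond a))
          = ms.filter (fun a => decide (cond a)) := by
        simp [h]
      rw [hfilter] at hnd
      have step : (List.foldl (fun d a => if cond a then d.insert (key a) (val a) else d) d (a :: ms))
          = List.foldl (fun d a => if cond a then d.insert (key a) (val a) else d) d ms := by
        simp [h]
      rw [step, ih d (fun b hb hcb => hfresh b (List.mem_cons_of_mem _ hb) hcb) hnd]
      simp [h]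

-- keys of a conditional filterMap are the filtered inputs
theorem map_fst_filterMap_ite (p : String → Prop) [DecidablePred p]
    (v : String → Int) (l : List String) :
    (l.filterMap (fun m => if p m then some (m, v m) else none)).map Prod.fst
      = l.filter (fun m => decide (p m)) := by
  induction l with
  | nil => rfl
  | cons a l ih =>
    by_cases h : p a <;> simp [h, ih]



-- Core equality between the two computations, over arbitrary dicts.
theorem delta_core (P C : PySem.Dict String Int)
    (hPnd : P.keys.Nodup) (hCnd : C.keys.Nodup) :
    (List.foldl (fun (d : PySem.Dict String Int) m =>
        if P.getD m 0 ≠ C.getD m 0 then d.insert m (C.getD m 0) else d)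
      PySem.Dict.empty
      (PySem.List.sorted (PySem.Set.union (PySem.Set.ofList P.keys) (PySem.Set.ofList C.keys))
        (fun x => x) false)).items
    = (PySem.Dict.ofList (PySem.List.sorted
        (List.foldl (fun (d : PySem.Dict String Int) kv =>
            if C.contains kv.1 = false ∧ kv.2 ≠ 0 then d.insert kv.1 0 else d)
          (List.foldl (fun (d : PySem.Dict String Int) kv =>
              if P.getD kv.1 0 ≠ kv.2 then d.insert kv.1 kv.2 else d)
            PySem.Dict.empty C.items)
          P.items).items (fun kv => kv.1) false)).items := by
  -- the sorted union of keys
  have hUnd : (PySem.Set.union (PySem.Set.ofList P.keys) (PySem.Set.ofList C.keys)).Nodup :=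
    PySem.Set.nodup_union _ _ (PySem.Set.nodup_ofList _)
  have hSperm := PySem.List.sorted_perm
      (PySem.Set.union (PySem.Set.ofList P.keys) (PySem.Set.ofList C.keys)) (fun x => x) false
  have hSnd : (PySem.List.sorted (PySem.Set.union (PySem.Set.ofList P.keys) (PySem.Set.ofList C.keys))
      (fun x => x) false).Nodup := hSperm.nodup_iff.mpr hUnd
  have hSlt : (PySem.List.sorted (PySem.Set.union (PySem.Set.ofList P.keys) (PySem.Set.ofList C.keys))
      (fun x => x) false).Pairwise (· < ·) := by
    have h1 := PySem.List.sorted_pairwise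
        (PySem.Set.union (PySem.Set.ofList P.keys) (PySem.Set.ofList C.keys)) (fun x => x)
    exact (h1.and hSnd).imp (fun h => lt_of_le_of_ne h.1 h.2)
  set S := PySem.List.sorted (PySem.Set.union (PySem.Set.ofList P.keys) (PySem.Set.ofList C.keys))
      (fun x => x) false with hSdef
  -- first pass of B
  have hd1 : (List.foldl (fun (d : PySem.Dict String Int) kv =>
        if P.getD kv.1 0 ≠ kv.2 then d.insert kv.1 kv.2 else d)
      PySem.Dict.empty C.items).items
      = C.items.filterMap (fun kv => if P.getD kv.1 0 ≠ kv.2 then some (kv.1, kv.2) else none) := by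
    have h := fold_cond_items (fun kv : String × Int => P.getD kv.1 0 ≠ kv.2)
        (fun kv => kv.1) (fun kv => kv.2) C.items PySem.Dict.empty
        (fun a _ _ => PySem.Dict.contains_empty a.1)
        (((List.filter_sublist).map (fun kv : String × Int => kv.1)).nodup hCnd)
    simpa [PySem.Dict.empty] using h
  set d1 := List.foldl (fun (d : PySem.Dict String Int) kv =>
      if P.getD kv.1 0 ≠ kv.2 then d.insert kv.1 kv.2 else d) PySem.Dict.empty C.items with hd1def
  -- second pass of B
  have hd1c : ∀ m : String, C.contains m = false → d1.contains m = false := by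
    intro m hm
    cases hc : d1.contains m with
    | false => rfl
    | true =>
      exfalso
      have hmem := (PySem.Dict.contains_iff_mem_keys d1 m).mp hc
      rw [PySem.Dict.keys, hd1] at hmem
      obtain ⟨kv, hkv, rfl⟩ := List.mem_map.mp hmem
      obtain ⟨b, hb, hbe⟩ := List.mem_filterMap.mp hkv
      have : kv = b := by
        by_cases h : P.getD b.1 0 ≠ b.2 <;> simp [h] at hbe
        exact hbe.symm
      subst this
      have : C.contains kv.1 = true :=
        (PySem.Dict.contains_iff_mem_keys C kv.1).mpr (List.mem_map_of_mem hb)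
      rw [hm] at this; cases this
  have hd2 : (List.foldl (fun (d : PySem.Dict String Int) kv =>
        if C.contains kv.1 = false ∧ kv.2 ≠ 0 then d.insert kv.1 0 else d) d1 P.items).items
      = d1.items ++ P.items.filterMap
          (fun kv => if C.contains kv.1 = false ∧ kv.2 ≠ 0 then some (kv.1, 0) else none) := by
    have h := fold_cond_items (fun kv : String × Int => C.contains kv.1 = false ∧ kv.2 ≠ 0)
        (fun kv => kv.1) (fun _ => 0) P.items d1 (fun a _ hca => hd1c a.1 hca.1)
        (((List.filter_sublist).map (fun kv : String × Int => kv.1)).nodup hPnd)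
    simpa using h
  -- rewrite both passes as key-indexed filterMaps
  have hg1 : C.items.filterMap (fun kv => if P.getD kv.1 0 ≠ kv.2 then some (kv.1, kv.2) else none)
      = C.keys.filterMap (pvF P C) := by
    rw [PySem.Dict.items_eq_map_keys C hCnd 0, List.filterMap_map]
    exact List.filterMap_congr (fun k _ => by simp [Function.comp, pvF])
  have hg2 : P.items.filterMap
        (fun kv => if C.contains kv.1 = false ∧ kv.2 ≠ 0 then some (kv.1, 0) else none)
      = (P.keys.filter (fun k => !C.contains k)).filterMap (pvF P C) := by
    rw [PySem.Dict.items_eq_map_keys P hPnd 0, List.filterMap_map, List.filterMap_filter]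
    refine List.filterMap_congr (fun k _ => ?_)
    cases hc : C.contains k with
    | true => simp [Function.comp, hc]
    | false =>
      have h0 : C.getD k 0 = 0 := PySem.Dict.getD_of_not_contains C 0 hc
      simp [Function.comp, pvF, hc, h0]
  -- the permutation of key lists
  have hkeysperm : S.Perm (C.keys ++ P.keys.filter (fun k => !C.contains k)) := by
    refine hSperm.trans ?_
    rw [List.perm_ext_iff_of_nodup hUnd ?_]
    · intro x
      rw [PySem.Set.mem_union, PySem.Set.mem_ofList, PySem.Set.mem_ofList, List.mem_append,
        List.mem_filter]
      by_cases hx : x ∈ C.keys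
      · have : C.contains x = true := (PySem.Dict.contains_iff_mem_keys C x).mpr hx
        simp [hx, this]
      · have : C.contains x = false := by
          cases h : C.contains x with
          | false => rfl
          | true => exact absurd ((PySem.Dict.contains_iff_mem_keys C x).mp h) hx
        simp [hx, this]
    · rw [List.nodup_append]
      refine ⟨hCnd, (List.filter_sublist).nodup hPnd, ?_⟩
      intro a ha b hb
      have hbc := (List.mem_filter.mp hb).2
      rintro rfl
      have : C.contains a = true := (PySem.Dict.contains_iff_mem_keys C a).mpr ha
      rw [this] at hbc; cases hbc
  -- B's sorted result is exactly A's list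
  have hsorteq : PySem.List.sorted (List.foldl (fun (d : PySem.Dict String Int) kv =>
        if C.contains kv.1 = false ∧ kv.2 ≠ 0 then d.insert kv.1 0 else d) d1 P.items).items
        (fun kv => kv.1) false
      = S.filterMap (pvF P C) := by
    refine PySem.List.sorted_eq_of_perm_of_pairwise_lt _ _ _ ?_ ?_
    · rw [hd2, hd1, hg1, hg2, ← List.filterMap_append]
      exact hkeysperm.filterMap _
    · refine List.pairwise_filterMap.mpr (hSlt.imp ?_)
      intro a a' hlt b hb b' hb'
      have h1 : b.1 = a := by
        unfold pvF at hb; split at hb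
        · cases hb; rfl
        · cases hb
      have h2 : b'.1 = a' := by
        unfold pvF at hb'; split at hb'
        · cases hb'; rfl
        · cases hb'
      rw [h1, h2]; exact hlt
  -- dict(sorted(...)) keeps the sorted items
  have hndL : ((S.filterMap (pvF P C)).map Prod.fst).Nodup := by
    unfold pvF
    rw [map_fst_filterMap_ite]
    exact hSnd.filter _
  have hofL : (PySem.Dict.ofList (S.filterMap (pvF P C))).items = S.filterMap (pvF P C) := by
    show (PySem.Dict.empty.update (S.filterMap (pvF P C))).items = _
    rw [PySem.Dict.update,
      PySem.Dict.items_foldl_insert_fresh _ Prod.fst (fun p => p.2) PySem.Dict.empty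
        (fun a _ => PySem.Dict.contains_empty a.1) hndL]
    simp [PySem.Dict.empty]
  -- A's side
  have hA := fold_cond_items (fun m : String => P.getD m 0 ≠ C.getD m 0) (fun m => m)
      (fun m => C.getD m 0) S PySem.Dict.empty (fun a _ _ => PySem.Dict.contains_empty a)
      (by
        have : (List.map (fun m : String => m) (S.filter
            (fun a => decide (P.getD a 0 ≠ C.getD a 0)))) = S.filter
            (fun a => decide (P.getD a 0 ≠ C.getD a 0)) := List.map_id' _
        rw [this]
        exact hSnd.filter _)
  rw [hA, hsorteq, hofL]
  simp [PySem.Dict.empty]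
  exact List.filterMap_congr (fun m _ => by simp [pvF])

-- ===== VERDICT (by name: the statement is the Claim_ definition above) =====
theorem build_delta_spec : Claim_equal_build_delta := by
  intro prevL curL _
  show build_delta prevL curL = build_delta_alt prevL curL
  exact delta_core (PySem.Dict.ofList prevL) (PySem.Dict.ofList curL)
    (PySem.Dict.nodup_keys_ofList prevL) (PySem.Dict.nodup_keys_ofList curL)
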